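-- pv_equiv track=rewrite | github.com/prat8897/TravellingSalesman | tspsolve.py | compare_cycles
-- ===== SOURCE A (Python) =====
-- def compare_cycles(cycle1, cycle2):
--     if not cycle1 or not cycle2:
--         return False
--
--     # Remove the last element if it's the same as the first (cycle completion)
--     if cycle1[0] == cycle1[-1]:
--         cycle1 = cycle1[:-1]
--     if cycle2[0] == cycle2[-1]:
--         cycle2 = cycle2[:-1]
--
--     if len(cycle1) != len(cycle2):
--         return False
--
--     N = len(cycle1)
--     cycle1_doubled = cycle1 * 2
--     cycle2_reversed = cycle2[::-1]
--
--     for i in range(N):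
--         # Check for rotations
--         if cycle1_doubled[i:i+N] == cycle2:
--             return True
--         if cycle1_doubled[i:i+N] == cycle2_reversed:
--             return True
--
--     return False
-- ===== SOURCE B (Python) =====
-- def compare_cycles(cycle1, cycle2):
--     if not cycle1 or not cycle2:
--         return False
--
--     # Drop the closing vertex if the cycle is written closed
--     if cycle1[0] == cycle1[-1]:
--         cycle1 = cycle1[:-1]
--     if cycle2[0] == cycle2[-1]:
--         cycle2 = cycle2[:-1]
--
--     n = len(cycle1)
--     if n != len(cycle2) or n == 0:
--         return False
--
--     P = 1000000007
--     B = 1 << 32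
--     r2 = cycle2[::-1]
--     d = cycle1 + cycle1
--
--     # Rabin-Karp: hashes of both patterns and of the first window of d
--     h2 = 0
--     hr = 0
--     h = 0
--     for j in range(n):
--         h2 = (h2 * B + cycle2[j]) % P
--         hr = (hr * B + r2[j]) % P
--         h = (h * B + d[j]) % P
--     pw = pow(B, n - 1, P)
--
--     # Roll the window across d; compare lists only on a hash hit
--     for i in range(n):
--         if h == h2 and d[i:i + n] == cycle2:
--             return True
--         if h == hr and d[i:i + n] == r2:
--             return True
--         h = ((h - d[i] * pw) * B + d[i + n]) % P
--     return False
-- ===== Notes on version B (the rewrite author's own statement) =====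
-- stated objective: alternative
-- what changed: Replaces A's per-rotation slice comparisons over the doubled list with a Rabin-Karp rolling hash (mod 1000000007, base 2^32) over the doubled list, comparing the window's list to cycle2 / reversed cycle2 only on a hash hit.
import Mathlib
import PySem

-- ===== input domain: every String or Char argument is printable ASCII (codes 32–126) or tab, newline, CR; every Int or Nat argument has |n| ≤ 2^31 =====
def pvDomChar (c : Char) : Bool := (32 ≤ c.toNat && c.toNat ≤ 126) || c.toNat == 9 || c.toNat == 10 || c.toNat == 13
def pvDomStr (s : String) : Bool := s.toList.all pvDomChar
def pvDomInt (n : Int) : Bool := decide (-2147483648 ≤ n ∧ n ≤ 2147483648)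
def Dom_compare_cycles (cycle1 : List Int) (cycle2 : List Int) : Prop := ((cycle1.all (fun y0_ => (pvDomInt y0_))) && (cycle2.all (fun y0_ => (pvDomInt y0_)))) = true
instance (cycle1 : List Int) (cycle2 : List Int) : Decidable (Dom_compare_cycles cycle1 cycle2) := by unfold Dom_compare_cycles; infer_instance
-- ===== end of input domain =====

-- B replaces A's O(N^2) all-rotations slice comparison by Rabin-Karp rolling hashes over the
-- doubled list (verifying on a hash hit), a different algorithm of the same exact behaviour.


-- ===== PORT A =====
-- A's 'for i in range(N): if cycle1_doubled[i:i+N] == cycle2: return True; if … == cycle2_reversed: return True'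
def aLoop (d c2 r2 : List Int) (N : Int) : List Int → Bool
  | [] => false
  | i :: rest =>
    if PySem.List.slice d (some i) (some (i + N)) = c2 then true
    else if PySem.List.slice d (some i) (some (i + N)) = r2 then true
    else aLoop d c2 r2 N rest

def compare_cycles (cycle1 : List Int) (cycle2 : List Int) : Bool :=
  if cycle1 = [] ∨ cycle2 = [] then false
  else
    let c1 := if PySem.List.pyGet? cycle1 0 = PySem.List.pyGet? cycle1 (-1) then PySem.List.slice cycle1 none (some (-1)) else cycle1
    let c2 := if PySem.List.pyGet? cycle2 0 = PySem.List.pyGet? cycle2 (-1) then PySem.List.slice cycle2 none (some (-1)) else cycle2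
    if c1.length ≠ c2.length then false
    else
      let N : Int := (c1.length : Int)
      let d := c1 ++ c1                -- cycle1 * 2
      let r2 := c2.reverse             -- cycle2[::-1]
      aLoop d c2 r2 N (PySem.List.pyRange 0 N 1)

-- ===== PORT B =====
-- 'h = (h * B + x) % P' folded over a list (the three hash-building loops of Source B)
def hashAcc (P B : Int) (xs : List Int) : Int :=
  xs.foldl (fun h x => PySem.Int.mod (h * B + x) P) 0

-- Source B's rolling loop: compare hashes, verify with a slice comparison only on a hit
def rkLoop (d c2 r2 : List Int) (n h2 hr pw P B : Int) : List Int → Int → Bool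
  | [], _ => false
  | i :: rest, h =>
    if h = h2 ∧ PySem.List.slice d (some i) (some (i + n)) = c2 then true
    else if h = hr ∧ PySem.List.slice d (some i) (some (i + n)) = r2 then true
    else rkLoop d c2 r2 n h2 hr pw P B rest
      (PySem.Int.mod ((h - (PySem.List.pyGetD d i 0) * pw) * B + PySem.List.pyGetD d (i + n) 0) P)

def compare_cycles_alt (cycle1 : List Int) (cycle2 : List Int) : Bool :=
  if cycle1 = [] ∨ cycle2 = [] then false
  else
    let c1 := if PySem.List.pyGet? cycle1 0 = PySem.List.pyGet? cycle1 (-1) then PySem.List.slice cycle1 none (some (-1)) else cycle1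
    let c2 := if PySem.List.pyGet? cycle2 0 = PySem.List.pyGet? cycle2 (-1) then PySem.List.slice cycle2 none (some (-1)) else cycle2
    if c1.length ≠ c2.length ∨ c1.length = 0 then false
    else
      let n := c1.length
      let P : Int := 1000000007
      let Bb : Int := 4294967296     -- 1 << 32
      let r2 := c2.reverse           -- cycle2[::-1]
      let d := c1 ++ c1
      let h2 := hashAcc P Bb c2
      let hr := hashAcc P Bb r2
      let h := hashAcc P Bb c1       -- d[j] for j in range(n) traverses exactly c1
      let pw := PySem.Int.powMod Bb (n - 1) P   -- pow(B, n-1, P)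
      rkLoop d c2 r2 (n : Int) h2 hr pw P Bb (PySem.List.pyRange 0 (n : Int) 1) h

-- ===== PRECONDITION & SPEC =====
def Spec_compare_cycles (cycle1 : List Int) (cycle2 : List Int) (out : Bool) : Prop := out = compare_cycles_alt cycle1 cycle2
instance (cycle1 : List Int) (cycle2 : List Int) (out : Bool) : Decidable (Spec_compare_cycles cycle1 cycle2 out) := by unfold Spec_compare_cycles; infer_instance

-- ===== CLAIM (what is proved, stated in full; the proofs are below) =====
def Claim_equal_compare_cycles : Prop := ∀ (cycle1 : List Int) (cycle2 : List Int), Dom_compare_cycles cycle1 cycle2 → Spec_compare_cycles cycle1 cycle2 (compare_cycles cycle1 cycle2)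

-- ===== LEMMAS AND PROOFS =====

-- raw Horner value of a digit list (no modulus)
def hRaw (B : Int) (xs : List Int) : Int :=
  xs.foldl (fun a x => a * B + x) 0

theorem hRaw_foldl_init (B : Int) (xs : List Int) : ∀ a : Int,
    xs.foldl (fun acc x => acc * B + x) a = a * B ^ xs.length + hRaw B xs := by
  induction xs with
  | nil => intro a; simp [hRaw]
  | cons x xs ih =>
    intro a
    simp only [List.foldl_cons, List.length_cons, hRaw]
    rw [ih (a * B + x), show (0 : Int) * B + x = x by ring, ih x]
    ring

theorem hRaw_cons (B x : Int) (xs : List Int) :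
    hRaw B (x :: xs) = x * B ^ xs.length + hRaw B xs := by
  rw [hRaw, List.foldl_cons, show (0 : Int) * B + x = x by ring, hRaw_foldl_init]

theorem hRaw_snoc (B y : Int) (xs : List Int) :
    hRaw B (xs ++ [y]) = hRaw B xs * B + y := by
  simp [hRaw, List.foldl_append]

theorem hashAcc_eq (P B : Int) (hP : 0 < P) (xs : List Int) :
    hashAcc P B xs = hRaw B xs % P := by
  induction xs using List.reverseRecOn with
  | nil => simp [hashAcc, hRaw]
  | append_singleton xs y ih =>
    rw [hashAcc, List.foldl_append, List.foldl_cons, List.foldl_nil, ← hashAcc,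
      PySem.Int.mod_eq_emod_of_pos hP, ih, hRaw_snoc]
    have h1 : hRaw B xs % P ≡ hRaw B xs [ZMOD P] := Int.emod_emod_of_dvd _ dvd_rfl
    exact ((h1.mul_right B).add_right y)

-- the rolling update of Source B recomputes the hash of the shifted window
theorem roll_step (P B x y : Int) (hP : 0 < P) (m : List Int) :
    PySem.Int.mod ((hashAcc P B (x :: m) - x * PySem.Int.powMod B m.length P) * B + y) P
      = hashAcc P B (m ++ [y]) := by
  rw [PySem.Int.mod_eq_emod_of_pos hP, PySem.Int.powMod_eq_emod _ _ hP,
    hashAcc_eq P B hP, hashAcc_eq P B hP, hRaw_cons, hRaw_snoc]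
  have h1 : (x * B ^ m.length + hRaw B m) % P ≡ x * B ^ m.length + hRaw B m [ZMOD P] :=
    Int.emod_emod_of_dvd _ dvd_rfl
  have h2 : B ^ m.length % P ≡ B ^ m.length [ZMOD P] := Int.emod_emod_of_dvd _ dvd_rfl
  have key : ((x * B ^ m.length + hRaw B m) % P - x * (B ^ m.length % P)) * B + y
      ≡ (x * B ^ m.length + hRaw B m - x * B ^ m.length) * B + y [ZMOD P] :=
    ((h1.sub (h2.mul_left x)).mul_right B).add_right y
  calc ((x * B ^ m.length + hRaw B m) % P - x * (B ^ m.length % P)) * B + y ≡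
      (x * B ^ m.length + hRaw B m - x * B ^ m.length) * B + y [ZMOD P] := key
    _ = hRaw B m * B + y := by ring

-- window decomposition lemmas
theorem window_cons (d : List Int) (i n : Nat) (hi : i < d.length) (hn : 0 < n) :
    (d.drop i).take n = d[i] :: (d.drop (i + 1)).take (n - 1) := by
  obtain ⟨m, rfl⟩ : ∃ m, n = m + 1 := ⟨n - 1, by omega⟩
  rw [List.drop_eq_getElem_cons hi, List.take_succ_cons]
  simp

theorem window_snoc (d : List Int) (i n : Nat) (hn : 0 < n) (hb : i + n < d.length) :
    (d.drop (i + 1)).take n = (d.drop (i + 1)).take (n - 1) ++ [d[i + n]] := by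
  obtain ⟨m, rfl⟩ : ∃ m, n = m + 1 := ⟨n - 1, by omega⟩
  have hlt : m < (d.drop (i + 1)).length := by simp; omega
  rw [List.take_add_one, List.getElem?_eq_getElem hlt]
  simp [show i + 1 + m = i + (m + 1) from by omega]

-- main loop correspondence: with the invariant 'h is the hash of the current window',
-- Rabin-Karp's guarded comparisons decide exactly what A's slice comparisons decide
theorem rk_eq_naive (d c2 r2 : List Int) (n : Nat) (hn : 0 < n)
    (hd : d.length = 2 * n) (hc2 : c2.length = n) (hr2 : r2.length = n) :
    ∀ (k i : Nat) (h : Int), i + k = n →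
      h = hashAcc 1000000007 4294967296 ((d.drop i).take n) →
      rkLoop d c2 r2 (n : Int) (hashAcc 1000000007 4294967296 c2)
        (hashAcc 1000000007 4294967296 r2)
        (PySem.Int.powMod 4294967296 (n - 1) 1000000007) 1000000007 4294967296
        (PySem.List.pyRange (i : Int) (n : Int) 1) h
      = aLoop d c2 r2 (n : Int) (PySem.List.pyRange (i : Int) (n : Int) 1) := by
  intro k
  induction k with
  | zero =>
    intro i h hik _
    have : (n : Int) ≤ (i : Int) := by omega
    rw [PySem.List.pyRange_one_eq_nil this]
    rfl
  | succ k ih =>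
    intro i h hik hh
    have hilt : i < n := by omega
    have hcons : PySem.List.pyRange (i : Int) (n : Int) 1
        = (i : Int) :: PySem.List.pyRange ((i : Int) + 1) (n : Int) 1 :=
      PySem.List.pyRange_one_cons (by exact_mod_cast hilt)
    have hslice : PySem.List.slice d (some (i : Int)) (some ((i : Int) + (n : Int)))
        = (d.drop i).take n := PySem.List.slice_natCast_add d i n
    rw [hcons, rkLoop, aLoop, hslice]
    by_cases hwc : (d.drop i).take n = c2
    · have : h = hashAcc 1000000007 4294967296 c2 := by rw [hh, hwc]
      simp [hwc, this]
    · by_cases hwr : (d.drop i).take n = r2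
      · have : h = hashAcc 1000000007 4294967296 r2 := by rw [hh, hwr]
        simp [hwr, this]
      · have hcast : (i : Int) + 1 = ((i + 1 : Nat) : Int) := by push_cast; ring
        simp only [hwc, hwr, and_false, if_false]
        rw [hcast]
        apply ih (i + 1) _ (by omega)
        -- the rolled hash is the hash of the next window
        have hi2n : i + n < d.length := by omega
        have hi1 : i < d.length := by omega
        have hget1 : PySem.List.pyGetD d (i : Int) 0 = d[i] := by
          rw [PySem.List.pyGetD_natCast]; exact List.getD_eq_getElem d 0 hi1
        have hget2 : PySem.List.pyGetD d ((i : Int) + (n : Int)) 0 = d[i + n] := by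
          rw [show (i : Int) + (n : Int) = ((i + n : Nat) : Int) by push_cast; ring,
            PySem.List.pyGetD_natCast]
          exact List.getD_eq_getElem d 0 hi2n
        have hmid : ((d.drop (i + 1)).take (n - 1)).length = n - 1 := by
          simp; omega
        rw [hget1, hget2, hh, window_cons d i n hi1 hn, window_snoc d i n hn hi2n]
        have rs := roll_step 1000000007 4294967296 d[i] d[i + n] (by norm_num)
          ((d.drop (i + 1)).take (n - 1))
        rw [hmid] at rs
        exact rs

-- ===== VERDICT (by name: the statement is the Claim_ definition above) =====
theorem compare_cycles_spec : Claim_equal_compare_cycles := by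
  intro cycle1 cycle2 _
  unfold Spec_compare_cycles compare_cycles compare_cycles_alt
  by_cases h0 : cycle1 = [] ∨ cycle2 = []
  · simp [h0]
  · simp only [h0, if_false]
    generalize (if PySem.List.pyGet? cycle1 0 = PySem.List.pyGet? cycle1 (-1) then PySem.List.slice cycle1 none (some (-1)) else cycle1) = c1
    generalize (if PySem.List.pyGet? cycle2 0 = PySem.List.pyGet? cycle2 (-1) then PySem.List.slice cycle2 none (some (-1)) else cycle2) = c2
    by_cases hlen : c1.length ≠ c2.length
    · rw [if_pos hlen, if_pos (Or.inl hlen)]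
    · rw [not_not] at hlen
      by_cases hz : c1.length = 0
      · have hc1 : c1 = [] := List.length_eq_zero_iff.mp hz
        have hc2 : c2 = [] := List.length_eq_zero_iff.mp (by omega)
        subst hc1; subst hc2
        decide
      · rw [if_neg (by simp [hlen]), if_neg (by rw [not_or]; exact ⟨not_not_intro hlen, hz⟩)]
        have hn : 0 < c1.length := Nat.pos_of_ne_zero hz
        have key := rk_eq_naive (c1 ++ c1) c2 c2.reverse c1.length hn
          (by simp; omega) hlen.symm (by simpa using hlen.symm) c1.length 0
          (hashAcc 1000000007 4294967296 c1)
          (by omega) (by rw [List.drop_zero, List.take_left])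
        simp only [Nat.cast_zero] at key
        exact key.symm
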